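-- pv_equiv track=rewrite | github.com/vineetsharma21/premnathrail | braking_logic.py | get_compliance
-- ===== SOURCE A (Python) =====
-- MAX_STOPPING_DISTANCES = {
--     8: 6, 10: 9, 16: 18, 20: 27, 24: 36,
--     30: 55, 32: 60, 40: 90, 50: 155, 60: 230,
--     70: 300, 80: 400, 90: 500, 100: 620
-- }
--
-- def get_compliance(speed, total_dist):
--     """Check if stopping distance complies with EN standard"""
--     # Find the appropriate limit for the current speed
--     allowed_distance = None
--     for limit_speed in sorted(MAX_STOPPING_DISTANCES.keys(), reverse=True):
--         if speed >= limit_speed: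
--             allowed_distance = MAX_STOPPING_DISTANCES[limit_speed]
--             break
--
--     if allowed_distance is None:
--         return "Standard Not Found"
--
--     if total_dist <= allowed_distance:
--         return "✓ Standard Followed"
--     else:
--         return "✗ Standard Exceeded"
-- ===== SOURCE B (Python) =====
-- MAX_STOPPING_DISTANCES = {
--     8: 6, 10: 9, 16: 18, 20: 27, 24: 36,
--     30: 55, 32: 60, 40: 90, 50: 155, 60: 230,
--     70: 300, 80: 400, 90: 500, 100: 620
-- }
--
-- def get_compliance(speed, total_dist):
--     """Check if stopping distance complies with EN standard"""
--     # Binary search (bisect_right) over the ascending speed limits for the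
--     # largest limit <= speed, instead of a descending linear scan.
--     items = sorted(MAX_STOPPING_DISTANCES.items())
--     lo, hi = 0, len(items)
--     while lo < hi:
--         mid = (lo + hi) // 2
--         if speed < items[mid][0]:
--             hi = mid
--         else:
--             lo = mid + 1
--     if lo == 0:
--         return "Standard Not Found"
--     allowed = items[lo - 1][1]
--     return "✓ Standard Followed" if total_dist <= allowed else "✗ Standard Exceeded"
-- ===== Notes on version B (the rewrite author's own statement) =====
-- stated objective: alternative
-- what changed: Replaces the descending linear scan with break by a hand-written bisect_right binary search over the ascending (limit, distance) pairs, indexing the bracket directly.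
import Mathlib
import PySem

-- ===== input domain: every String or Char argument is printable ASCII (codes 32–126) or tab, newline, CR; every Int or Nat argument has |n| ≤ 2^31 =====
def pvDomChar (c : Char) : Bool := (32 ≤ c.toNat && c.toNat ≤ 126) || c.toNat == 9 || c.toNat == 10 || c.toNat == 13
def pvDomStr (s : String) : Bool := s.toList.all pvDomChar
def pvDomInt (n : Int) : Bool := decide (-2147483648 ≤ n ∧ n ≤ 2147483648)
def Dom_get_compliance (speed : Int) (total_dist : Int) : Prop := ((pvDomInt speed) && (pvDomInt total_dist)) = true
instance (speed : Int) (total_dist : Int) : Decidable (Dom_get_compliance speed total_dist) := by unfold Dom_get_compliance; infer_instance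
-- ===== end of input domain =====

-- B replaces A's descending linear scan with a binary search (bisect_right) over the ascending limits; alternative decomposition, same results.


-- ===== PORT A =====
-- A iterates over the limits in descending order and breaks at the first limit <= speed.
def pvDescList : List (Int × Int) :=
  [(100, 620), (90, 500), (80, 400), (70, 300), (60, 230), (50, 155), (40, 90),
   (32, 60), (30, 55), (24, 36), (20, 27), (16, 18), (10, 9), (8, 6)]

-- the for-loop with break: first (limit, dist) with speed >= limit
def pvFindA (xs : List (Int × Int)) (speed : Int) : Option Int :=
  match xs with
  | [] => none
  | (k, v) :: rest => if speed ≥ k then some v else pvFindA rest speed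

def get_compliance (speed : Int) (total_dist : Int) : String :=
  match pvFindA pvDescList speed with
  | none => "Standard Not Found"
  | some allowed => if total_dist ≤ allowed then "✓ Standard Followed" else "✗ Standard Exceeded"

-- ===== PORT B =====
-- sorted(MAX_STOPPING_DISTANCES.items()): ascending (limit, dist) pairs
def pvAscList : List (Int × Int) :=
  [(8, 6), (10, 9), (16, 18), (20, 27), (24, 36), (30, 55), (32, 60), (40, 90),
   (50, 155), (60, 230), (70, 300), (80, 400), (90, 500), (100, 620)]

-- the while lo < hi binary-search loop; items[mid] is always in range, so getD is exact here,
-- and (lo + hi) // 2 on nonnegative Nats coincides with Lean's Nat division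
def pvBisect (xs : List (Int × Int)) (speed : Int) (lo hi : Nat) : Nat :=
  if lo < hi then
    let mid := (lo + hi) / 2
    if speed < (xs.getD mid (0, 0)).1 then pvBisect xs speed lo mid
    else pvBisect xs speed (mid + 1) hi
  else lo
termination_by hi - lo
decreasing_by all_goals omega

def get_compliance_alt (speed : Int) (total_dist : Int) : String :=
  let items := pvAscList
  let lo := pvBisect items speed 0 items.length
  if lo = 0 then "Standard Not Found"
  else
    let allowed := (items.getD (lo - 1) (0, 0)).2
    if total_dist ≤ allowed then "✓ Standard Followed" else "✗ Standard Exceeded"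

-- ===== PRECONDITION & SPEC =====
def Spec_get_compliance (speed : Int) (total_dist : Int) (out : String) : Prop := out = get_compliance_alt speed total_dist
instance (speed : Int) (total_dist : Int) (out : String) : Decidable (Spec_get_compliance speed total_dist out) := by unfold Spec_get_compliance; infer_instance

-- ===== CLAIM (what is proved, stated in full; the proofs are below) =====
def Claim_equal_get_compliance : Prop := ∀ (speed : Int) (total_dist : Int), Dom_get_compliance speed total_dist → Spec_get_compliance speed total_dist (get_compliance speed total_dist)

-- ===== LEMMAS AND PROOFS =====

-- ===== VERDICT (by name: the statement is the Claim_ definition above) =====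
set_option maxRecDepth 4000 in
set_option maxHeartbeats 1600000 in
theorem get_compliance_spec : Claim_equal_get_compliance := by
  intro speed total_dist _
  unfold Spec_get_compliance
  by_cases h0 : speed < (8:Int)
  · simp [get_compliance, get_compliance_alt, pvFindA, pvDescList, pvAscList,
        pvBisect, List.getD, show ¬ (100:Int) ≤ speed by omega, show ¬ (90:Int) ≤ speed by omega, show ¬ (80:Int) ≤ speed by omega, show ¬ (70:Int) ≤ speed by omega, show ¬ (60:Int) ≤ speed by omega, show ¬ (50:Int) ≤ speed by omega, show ¬ (40:Int) ≤ speed by omega, show ¬ (32:Int) ≤ speed by omega, show ¬ (30:Int) ≤ speed by omega, show ¬ (24:Int) ≤ speed by omega, show ¬ (20:Int) ≤ speed by omega, show ¬ (16:Int) ≤ speed by omega, show ¬ (10:Int) ≤ speed by omega, show ¬ (8:Int) ≤ speed by omega, show speed < (40:Int) by omega, show speed < (20:Int) by omega, show speed < (10:Int) by omega, show speed < (8:Int) by omega]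
  by_cases h1 : speed < (10:Int)
  · simp [get_compliance, get_compliance_alt, pvFindA, pvDescList, pvAscList,
        pvBisect, List.getD, show ¬ (100:Int) ≤ speed by omega, show ¬ (90:Int) ≤ speed by omega, show ¬ (80:Int) ≤ speed by omega, show ¬ (70:Int) ≤ speed by omega, show ¬ (60:Int) ≤ speed by omega, show ¬ (50:Int) ≤ speed by omega, show ¬ (40:Int) ≤ speed by omega, show ¬ (32:Int) ≤ speed by omega, show ¬ (30:Int) ≤ speed by omega, show ¬ (24:Int) ≤ speed by omega, show ¬ (20:Int) ≤ speed by omega, show ¬ (16:Int) ≤ speed by omega, show ¬ (10:Int) ≤ speed by omega, show (8:Int) ≤ speed by omega, show speed < (40:Int) by omega, show speed < (20:Int) by omega, show speed < (10:Int) by omega, show ¬ speed < (8:Int) by omega]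
  by_cases h2 : speed < (16:Int)
  · simp [get_compliance, get_compliance_alt, pvFindA, pvDescList, pvAscList,
        pvBisect, List.getD, show ¬ (100:Int) ≤ speed by omega, show ¬ (90:Int) ≤ speed by omega, show ¬ (80:Int) ≤ speed by omega, show ¬ (70:Int) ≤ speed by omega, show ¬ (60:Int) ≤ speed by omega, show ¬ (50:Int) ≤ speed by omega, show ¬ (40:Int) ≤ speed by omega, show ¬ (32:Int) ≤ speed by omega, show ¬ (30:Int) ≤ speed by omega, show ¬ (24:Int) ≤ speed by omega, show ¬ (20:Int) ≤ speed by omega, show ¬ (16:Int) ≤ speed by omega, show (10:Int) ≤ speed by omega, show speed < (40:Int) by omega, show speed < (20:Int) by omega, show ¬ speed < (10:Int) by omega, show speed < (16:Int) by omega]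
  by_cases h3 : speed < (20:Int)
  · simp [get_compliance, get_compliance_alt, pvFindA, pvDescList, pvAscList,
        pvBisect, List.getD, show ¬ (100:Int) ≤ speed by omega, show ¬ (90:Int) ≤ speed by omega, show ¬ (80:Int) ≤ speed by omega, show ¬ (70:Int) ≤ speed by omega, show ¬ (60:Int) ≤ speed by omega, show ¬ (50:Int) ≤ speed by omega, show ¬ (40:Int) ≤ speed by omega, show ¬ (32:Int) ≤ speed by omega, show ¬ (30:Int) ≤ speed by omega, show ¬ (24:Int) ≤ speed by omega, show ¬ (20:Int) ≤ speed by omega, show (16:Int) ≤ speed by omega, show speed < (40:Int) by omega, show speed < (20:Int) by omega, show ¬ speed < (10:Int) by omega, show ¬ speed < (16:Int) by omega]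
  by_cases h4 : speed < (24:Int)
  · simp [get_compliance, get_compliance_alt, pvFindA, pvDescList, pvAscList,
        pvBisect, List.getD, show ¬ (100:Int) ≤ speed by omega, show ¬ (90:Int) ≤ speed by omega, show ¬ (80:Int) ≤ speed by omega, show ¬ (70:Int) ≤ speed by omega, show ¬ (60:Int) ≤ speed by omega, show ¬ (50:Int) ≤ speed by omega, show ¬ (40:Int) ≤ speed by omega, show ¬ (32:Int) ≤ speed by omega, show ¬ (30:Int) ≤ speed by omega, show ¬ (24:Int) ≤ speed by omega, show (20:Int) ≤ speed by omega, show speed < (40:Int) by omega, show ¬ speed < (20:Int) by omega, show speed < (30:Int) by omega, show speed < (24:Int) by omega]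
  by_cases h5 : speed < (30:Int)
  · simp [get_compliance, get_compliance_alt, pvFindA, pvDescList, pvAscList,
        pvBisect, List.getD, show ¬ (100:Int) ≤ speed by omega, show ¬ (90:Int) ≤ speed by omega, show ¬ (80:Int) ≤ speed by omega, show ¬ (70:Int) ≤ speed by omega, show ¬ (60:Int) ≤ speed by omega, show ¬ (50:Int) ≤ speed by omega, show ¬ (40:Int) ≤ speed by omega, show ¬ (32:Int) ≤ speed by omega, show ¬ (30:Int) ≤ speed by omega, show (24:Int) ≤ speed by omega, show speed < (40:Int) by omega, show ¬ speed < (20:Int) by omega, show speed < (30:Int) by omega, show ¬ speed < (24:Int) by omega]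
  by_cases h6 : speed < (32:Int)
  · simp [get_compliance, get_compliance_alt, pvFindA, pvDescList, pvAscList,
        pvBisect, List.getD, show ¬ (100:Int) ≤ speed by omega, show ¬ (90:Int) ≤ speed by omega, show ¬ (80:Int) ≤ speed by omega, show ¬ (70:Int) ≤ speed by omega, show ¬ (60:Int) ≤ speed by omega, show ¬ (50:Int) ≤ speed by omega, show ¬ (40:Int) ≤ speed by omega, show ¬ (32:Int) ≤ speed by omega, show (30:Int) ≤ speed by omega, show speed < (40:Int) by omega, show ¬ speed < (20:Int) by omega, show ¬ speed < (30:Int) by omega, show speed < (32:Int) by omega]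
  by_cases h7 : speed < (40:Int)
  · simp [get_compliance, get_compliance_alt, pvFindA, pvDescList, pvAscList,
        pvBisect, List.getD, show ¬ (100:Int) ≤ speed by omega, show ¬ (90:Int) ≤ speed by omega, show ¬ (80:Int) ≤ speed by omega, show ¬ (70:Int) ≤ speed by omega, show ¬ (60:Int) ≤ speed by omega, show ¬ (50:Int) ≤ speed by omega, show ¬ (40:Int) ≤ speed by omega, show (32:Int) ≤ speed by omega, show speed < (40:Int) by omega, show ¬ speed < (20:Int) by omega, show ¬ speed < (30:Int) by omega, show ¬ speed < (32:Int) by omega]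
  by_cases h8 : speed < (50:Int)
  · simp [get_compliance, get_compliance_alt, pvFindA, pvDescList, pvAscList,
        pvBisect, List.getD, show ¬ (100:Int) ≤ speed by omega, show ¬ (90:Int) ≤ speed by omega, show ¬ (80:Int) ≤ speed by omega, show ¬ (70:Int) ≤ speed by omega, show ¬ (60:Int) ≤ speed by omega, show ¬ (50:Int) ≤ speed by omega, show (40:Int) ≤ speed by omega, show ¬ speed < (40:Int) by omega, show speed < (80:Int) by omega, show speed < (60:Int) by omega, show speed < (50:Int) by omega]
  by_cases h9 : speed < (60:Int)
  · simp [get_compliance, get_compliance_alt, pvFindA, pvDescList, pvAscList,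
        pvBisect, List.getD, show ¬ (100:Int) ≤ speed by omega, show ¬ (90:Int) ≤ speed by omega, show ¬ (80:Int) ≤ speed by omega, show ¬ (70:Int) ≤ speed by omega, show ¬ (60:Int) ≤ speed by omega, show (50:Int) ≤ speed by omega, show ¬ speed < (40:Int) by omega, show speed < (80:Int) by omega, show speed < (60:Int) by omega, show ¬ speed < (50:Int) by omega]
  by_cases h10 : speed < (70:Int)
  · simp [get_compliance, get_compliance_alt, pvFindA, pvDescList, pvAscList,
        pvBisect, List.getD, show ¬ (100:Int) ≤ speed by omega, show ¬ (90:Int) ≤ speed by omega, show ¬ (80:Int) ≤ speed by omega, show ¬ (70:Int) ≤ speed by omega, show (60:Int) ≤ speed by omega, show ¬ speed < (40:Int) by omega, show speed < (80:Int) by omega, show ¬ speed < (60:Int) by omega, show speed < (70:Int) by omega]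
  by_cases h11 : speed < (80:Int)
  · simp [get_compliance, get_compliance_alt, pvFindA, pvDescList, pvAscList,
        pvBisect, List.getD, show ¬ (100:Int) ≤ speed by omega, show ¬ (90:Int) ≤ speed by omega, show ¬ (80:Int) ≤ speed by omega, show (70:Int) ≤ speed by omega, show ¬ speed < (40:Int) by omega, show speed < (80:Int) by omega, show ¬ speed < (60:Int) by omega, show ¬ speed < (70:Int) by omega]
  by_cases h12 : speed < (90:Int)
  · simp [get_compliance, get_compliance_alt, pvFindA, pvDescList, pvAscList,
        pvBisect, List.getD, show ¬ (100:Int) ≤ speed by omega, show ¬ (90:Int) ≤ speed by omega, show (80:Int) ≤ speed by omega, show ¬ speed < (40:Int) by omega, show ¬ speed < (80:Int) by omega, show speed < (100:Int) by omega, show speed < (90:Int) by omega]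
  by_cases h13 : speed < (100:Int)
  · simp [get_compliance, get_compliance_alt, pvFindA, pvDescList, pvAscList,
        pvBisect, List.getD, show ¬ (100:Int) ≤ speed by omega, show (90:Int) ≤ speed by omega, show ¬ speed < (40:Int) by omega, show ¬ speed < (80:Int) by omega, show speed < (100:Int) by omega, show ¬ speed < (90:Int) by omega]
  · simp [get_compliance, get_compliance_alt, pvFindA, pvDescList, pvAscList,
        pvBisect, List.getD, show (100:Int) ≤ speed by omega, show ¬ speed < (40:Int) by omega, show ¬ speed < (80:Int) by omega, show ¬ speed < (100:Int) by omega]
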